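-- pv_equiv track=rewrite | github.com/rawnoob25/SublistsAndPermutations | sublists.py | twoPartitionSublist_generator
-- ===== SOURCE A (Python) =====
-- def twoPartitionSublist_generator(L):
--     """This function returns a generator that yields disjoint pairs of sublists of L. Each such pair
--        is a tuple. Each tuple yielded by the generator is one possible value-set for a pair of
--        knapsacks- each member of which contains items from list L; no item of L is present in both knapsacks.
--     """
--     n=len(L)
--     for i in range(3**n):
--         knap1,knap2=[],[]
--         psn=0
--         k=i
--         while k>0:
--             #determine value of psn-th digit of base-3 representation
--             #of k; if it's 1, add L[psn] to knap1; otherwise if it (psn-th digit) is 2, add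
--             #L[psn] to knap2.
--             if k%3==1:
--                 knap1.append(L[psn])
--             elif k%3==2:
--                 knap2.append(L[psn])
--             else:
--                 pass
--             k//=3
--             psn+=1
--         yield((knap1,knap2))
-- ===== SOURCE B (Python) =====
-- def twoPartitionSublist_generator(L):
--     """Generator of all disjoint pairs of (index-ordered) sublists of L, in the
--        same order as the base-3 counter version: element 0 varies fastest."""
--     if not L:
--         yield ([], [])
--         return
--     head = L[0]
--     for knap1, knap2 in twoPartitionSublist_generator(L[1:]):
--         yield (knap1, knap2)
--         yield ([head] + knap1, knap2)
--         yield (knap1, [head] + knap2)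
-- ===== Notes on version B (the rewrite author's own statement) =====
-- stated objective: simpler
-- what changed: Replaces the base-3 integer counter with its per-i digit-decoding while loop by a direct recursion on the list: recurse on the tail and emit each tail partition three times (skip / prepend head to knap1 / prepend head to knap2), which reproduces the element-0-varies-fastest order without any arithmetic.
import Mathlib
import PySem

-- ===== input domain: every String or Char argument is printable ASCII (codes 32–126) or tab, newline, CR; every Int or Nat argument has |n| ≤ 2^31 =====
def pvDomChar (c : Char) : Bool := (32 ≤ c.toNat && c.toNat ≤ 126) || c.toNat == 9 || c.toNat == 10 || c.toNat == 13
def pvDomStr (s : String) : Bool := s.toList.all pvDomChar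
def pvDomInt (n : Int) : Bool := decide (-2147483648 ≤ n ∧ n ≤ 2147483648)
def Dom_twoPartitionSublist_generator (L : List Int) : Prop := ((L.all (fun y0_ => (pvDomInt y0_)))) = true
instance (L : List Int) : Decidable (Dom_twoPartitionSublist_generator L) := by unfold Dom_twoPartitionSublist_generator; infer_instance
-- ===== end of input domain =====

-- B replaces A's base-3 counter and per-i digit-decoding while loop by a direct recursion on
-- the list, emitting each tail partition three times (simpler). Both Pythons are generators;
-- the ports materialise the yielded sequence as a list.

-- ===== PORT A =====
-- the inner 'while k>0' loop of A; L[psn] is ported with pyGetD (default 0): on every call A makes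
-- (0 < k, k < 3^(len L) at the top level) psn stays below len L while k > 0, so the index is always
-- in range and this is exact (Python never raises here).
def pvAWhile (L : List Int) (knap1 knap2 : List Int) (psn k : Int) : List Int × List Int :=
  if hk : 0 < k then
    if PySem.Int.mod k 3 = 1 then
      pvAWhile L (knap1 ++ [PySem.List.pyGetD L psn 0]) knap2 (psn + 1) (PySem.Int.floordiv k 3)
    else if PySem.Int.mod k 3 = 2 then
      pvAWhile L knap1 (knap2 ++ [PySem.List.pyGetD L psn 0]) (psn + 1) (PySem.Int.floordiv k 3)
    else
      pvAWhile L knap1 knap2 (psn + 1) (PySem.Int.floordiv k 3)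
  else (knap1, knap2)
termination_by k.toNat
decreasing_by
  all_goals
    rw [PySem.Int.floordiv_eq_ediv_of_pos (by norm_num : (0:Int) < 3)]
    omega

def twoPartitionSublist_generator (L : List Int) : List (List Int × List Int) :=
  (PySem.List.pyRange 0 ((3:Int) ^ L.length) 1).map (fun i => pvAWhile L [] [] 0 i)

-- ===== PORT B =====
def pvAltAux : List Int → List (List Int × List Int)
  | [] => [([], [])]
  | h :: t => (pvAltAux t).flatMap (fun p => [(p.1, p.2), (h :: p.1, p.2), (p.1, h :: p.2)])

def twoPartitionSublist_generator_alt (L : List Int) : List (List Int × List Int) :=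
  pvAltAux L

-- ===== PRECONDITION & SPEC =====
def Spec_twoPartitionSublist_generator (L : List Int) (out : List (List Int × List Int)) : Prop := out = twoPartitionSublist_generator_alt L
instance (L : List Int) (out : List (List Int × List Int)) : Decidable (Spec_twoPartitionSublist_generator L out) := by unfold Spec_twoPartitionSublist_generator; infer_instance

-- ===== CLAIM (what is proved, stated in full; the proofs are below) =====
def Claim_equal_twoPartitionSublist_generator : Prop := ∀ (L : List Int), Dom_twoPartitionSublist_generator L → Spec_twoPartitionSublist_generator L (twoPartitionSublist_generator L)

-- ===== LEMMAS AND PROOFS =====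

theorem pvAWhile_zero (L k1 k2 : List Int) (psn : Int) : pvAWhile L k1 k2 psn 0 = (k1, k2) := by
  unfold pvAWhile; simp

-- indexing past a fresh head: the loop on (h :: t) at position psn+1 is the loop on t at psn
theorem pvAWhile_shift_fuel : ∀ (N : Nat) (h : Int) (t : List Int) (k1 k2 : List Int) (psn : Nat) (k : Int),
    k.toNat ≤ N → pvAWhile (h :: t) k1 k2 ((psn : Int) + 1) k = pvAWhile t k1 k2 (psn : Int) k := by
  intro N
  induction N with
  | zero =>
      intro h t k1 k2 psn k hk
      have hnp : ¬ 0 < k := by omega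
      conv_lhs => rw [pvAWhile]
      conv_rhs => rw [pvAWhile]
      simp [hnp]
  | succ N ih =>
      intro h t k1 k2 psn k hk
      by_cases hpos : 0 < k
      · have hget : PySem.List.pyGetD (h :: t) ((psn:Int) + 1) 0 = PySem.List.pyGetD t (psn:Int) 0 := by
          have e : ((psn:Int)+1) = ((psn+1 : Nat) : Int) := by push_cast; ring
          rw [e, PySem.List.pyGetD_natCast, PySem.List.pyGetD_natCast]
          simp [List.getD]
        have hlt : (PySem.Int.floordiv k 3).toNat ≤ N := by
          rw [PySem.Int.floordiv_eq_ediv_of_pos (by norm_num : (0:Int) < 3)]; omega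
        have e1 : ((psn+1:Nat):Int) = (psn:Int)+1 := by push_cast; ring
        conv_lhs => rw [pvAWhile]
        conv_rhs => rw [pvAWhile]
        simp only [dif_pos hpos]
        split_ifs with h1 h2
        · rw [hget, ← e1, ih h t _ k2 (psn+1) _ hlt, e1]
        · rw [hget, ← e1, ih h t k1 _ (psn+1) _ hlt, e1]
        · rw [← e1, ih h t k1 k2 (psn+1) _ hlt, e1]
      · conv_lhs => rw [pvAWhile]
        conv_rhs => rw [pvAWhile]
        simp [hpos]

theorem pvAWhile_shift (h : Int) (t : List Int) (k1 k2 : List Int) (psn : Nat) (k : Int) :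
    pvAWhile (h :: t) k1 k2 ((psn : Int) + 1) k = pvAWhile t k1 k2 (psn : Int) k :=
  pvAWhile_shift_fuel k.toNat h t k1 k2 psn k le_rfl

-- the accumulators are only ever appended to
theorem pvAWhile_accum_fuel : ∀ (N : Nat) (L k1 k2 a b : List Int) (psn k : Int), k.toNat ≤ N →
    pvAWhile L (k1 ++ a) (k2 ++ b) psn k
      = (k1 ++ (pvAWhile L a b psn k).1, k2 ++ (pvAWhile L a b psn k).2) := by
  intro N
  induction N with
  | zero =>
      intro L k1 k2 a b psn k hk
      have hnp : ¬ 0 < k := by omega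
      conv_lhs => rw [pvAWhile]
      conv_rhs => rw [pvAWhile]
      simp [hnp]
  | succ N ih =>
      intro L k1 k2 a b psn k hk
      by_cases hpos : 0 < k
      · have hlt : (PySem.Int.floordiv k 3).toNat ≤ N := by
          rw [PySem.Int.floordiv_eq_ediv_of_pos (by norm_num : (0:Int) < 3)]; omega
        conv_lhs => rw [pvAWhile]
        conv_rhs => rw [pvAWhile]
        simp only [dif_pos hpos]
        split_ifs with h1 h2
        · rw [List.append_assoc, ih L k1 k2 _ b _ _ hlt]
        · rw [List.append_assoc, ih L k1 k2 a _ _ _ hlt]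
        · rw [ih L k1 k2 a b _ _ hlt]
      · conv_lhs => rw [pvAWhile]
        conv_rhs => rw [pvAWhile]
        simp [hpos]

theorem pvAWhile_accum (L a b : List Int) (k1 k2 : List Int) (psn k : Int) :
    pvAWhile L (k1 ++ a) (k2 ++ b) psn k
      = (k1 ++ (pvAWhile L a b psn k).1, k2 ++ (pvAWhile L a b psn k).2) :=
  pvAWhile_accum_fuel k.toNat L k1 k2 a b psn k le_rfl

theorem pv_mod_digit (r d : Nat) (hd : d < 3) :
    PySem.Int.mod ((3 * r + d : Nat) : Int) 3 = (d : Int) := by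
  rw [PySem.Int.mod_eq_emod_of_pos (by norm_num : (0:Int) < 3)]
  push_cast
  omega

theorem pv_div_digit (r d : Nat) (hd : d < 3) :
    PySem.Int.floordiv ((3 * r + d : Nat) : Int) 3 = (r : Int) := by
  rw [PySem.Int.floordiv_eq_ediv_of_pos (by norm_num : (0:Int) < 3)]
  push_cast
  omega

-- one base-3 digit of the counter = one three-way choice for the head element
theorem pv_decomp0 (h : Int) (t : List Int) (r : Nat) :
    pvAWhile (h :: t) [] [] 0 ((3 * r : Nat) : Int) = pvAWhile t [] [] 0 (r : Nat) := by
  by_cases hr : r = 0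
  · subst hr; simp [pvAWhile_zero]
  · have hpos : (0:Int) < ((3 * r : Nat) : Int) := by push_cast; omega
    conv_lhs => rw [pvAWhile]
    have hm : PySem.Int.mod ((3 * r : Nat) : Int) 3 = (0 : Int) := by
      simpa using pv_mod_digit r 0 (by omega)
    have hq : PySem.Int.floordiv ((3 * r : Nat) : Int) 3 = (r : Int) := by
      simpa using pv_div_digit r 0 (by omega)
    simp only [dif_pos hpos, hm, hq]
    norm_num
    have := pvAWhile_shift h t [] [] 0 (r : Int)
    simpa using this

theorem pv_decomp1 (h : Int) (t : List Int) (r : Nat) :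
    pvAWhile (h :: t) [] [] 0 ((3 * r + 1 : Nat) : Int)
      = (h :: (pvAWhile t [] [] 0 (r : Nat)).1, (pvAWhile t [] [] 0 (r : Nat)).2) := by
  have hpos : (0:Int) < ((3 * r + 1 : Nat) : Int) := by push_cast; omega
  conv_lhs => rw [pvAWhile]
  simp only [dif_pos hpos, pv_mod_digit r 1 (by omega), pv_div_digit r 1 (by omega)]
  norm_num
  have hs := pvAWhile_shift h t [h] [] 0 (r : Int)
  simp only [Nat.cast_zero, zero_add] at hs
  rw [hs]
  have ha := pvAWhile_accum t [] [] [h] [] 0 (r : Int)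
  simpa using ha

theorem pv_decomp2 (h : Int) (t : List Int) (r : Nat) :
    pvAWhile (h :: t) [] [] 0 ((3 * r + 2 : Nat) : Int)
      = ((pvAWhile t [] [] 0 (r : Nat)).1, h :: (pvAWhile t [] [] 0 (r : Nat)).2) := by
  have hpos : (0:Int) < ((3 * r + 2 : Nat) : Int) := by push_cast; omega
  conv_lhs => rw [pvAWhile]
  simp only [dif_pos hpos, pv_mod_digit r 2 (by omega), pv_div_digit r 2 (by omega)]
  norm_num
  have hs := pvAWhile_shift h t [] [h] 0 (r : Int)
  simp only [Nat.cast_zero, zero_add] at hs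
  rw [hs]
  have ha := pvAWhile_accum t [] [] [] [h] 0 (r : Int)
  simpa using ha

-- regrouping range(3*m) into m consecutive triples
theorem range_three_mul (m : Nat) (f : Nat → List (List Int × List Int)) :
    (List.range (3 * m)).flatMap f
      = (List.range m).flatMap (fun r => f (3 * r) ++ f (3 * r + 1) ++ f (3 * r + 2)) := by
  induction m with
  | zero => simp
  | succ m ih =>
      have h3 : 3 * (m + 1) = (3 * m) + 1 + 1 + 1 := by omega
      rw [h3, List.range_succ, List.range_succ, List.range_succ, List.range_succ]
      simp [ih]

theorem main_lemma (L : List Int) :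
    (List.range (3 ^ L.length)).map (fun (i : Nat) => pvAWhile L [] [] 0 (i : Int))
      = pvAltAux L := by
  induction L with
  | nil => simp [pvAltAux, pvAWhile_zero]
  | cons h t ih =>
      have hlen : (h :: t).length = t.length + 1 := rfl
      rw [hlen, pow_succ, mul_comm, List.map_eq_flatMap, range_three_mul]
      simp only [pv_decomp0, pv_decomp1, pv_decomp2]
      rw [pvAltAux, ← ih, List.map_eq_flatMap, List.flatMap_assoc]
      simp

-- ===== VERDICT (by name: the statement is the Claim_ definition above) =====
theorem twoPartitionSublist_generator_spec : Claim_equal_twoPartitionSublist_generator := by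
  intro L _
  unfold Spec_twoPartitionSublist_generator twoPartitionSublist_generator twoPartitionSublist_generator_alt
  rw [PySem.List.pyRange_one]
  have e : (((3:Int) ^ L.length) - 0).toNat = 3 ^ L.length := by
    have h3 : ((3:Int) ^ L.length) = ((3 ^ L.length : Nat) : Int) := by push_cast; ring
    rw [sub_zero, h3, Int.toNat_natCast]
  rw [e, List.map_map]
  simp only [zero_add, Function.comp_def]
  exact main_lemma L
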